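-- pv_equiv track=rewrite | github.com/Felix-Nilsson/crypto | code/shamirssecretsharing.py | lin_comb
-- ===== SOURCE A (Python) =====
-- def lin_comb(l):
--     pairs = []
--
--     for i in range(len(l)):
--         if i + 1 >= len(l):
--             pairs.append((l[0], l[-1]))
--         else:
--             pairs.append((l[i], l[i + 1]))
--
--     return pairs
-- ===== SOURCE B (Python) =====
-- def lin_comb(l):
--     if not l:
--         return []
--     rev = [(l[0], l[-1])]
--     succ = None
--     for x in reversed(l):
--         if succ is not None:
--             rev.append((x, succ))
--         succ = x
--     rev.reverse()
--     return rev
-- ===== Notes on version B (the rewrite author's own statement) =====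
-- stated objective: alternative
-- what changed: Instead of an indexed forward loop with a per-iteration wrap branch, B seeds the wrap-around pair, traverses the list in REVERSE carrying the successor element (no indexing, no length test per step), building the output back-to-front, and finishes with a single in-place reverse.
import Mathlib
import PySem

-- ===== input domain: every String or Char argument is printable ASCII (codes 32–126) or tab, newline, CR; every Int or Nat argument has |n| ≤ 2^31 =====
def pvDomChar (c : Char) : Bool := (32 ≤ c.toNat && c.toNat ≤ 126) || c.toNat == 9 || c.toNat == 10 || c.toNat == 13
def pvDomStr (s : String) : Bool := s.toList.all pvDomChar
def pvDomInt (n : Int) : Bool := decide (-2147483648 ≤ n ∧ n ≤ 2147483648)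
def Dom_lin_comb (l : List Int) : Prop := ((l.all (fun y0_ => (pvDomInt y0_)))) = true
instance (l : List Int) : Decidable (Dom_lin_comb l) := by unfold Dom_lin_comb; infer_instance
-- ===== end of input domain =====

-- B builds the result back-to-front: it seeds the wrap-around pair and folds over the REVERSED list
-- carrying the successor element (no per-step indexing or length test), then reverses once (alternative; same O(n) cost).


-- ===== PORT A =====
-- literal port of A: for i in range(len(l)): branch on i+1 >= len(l), append wrap or adjacent pair
def lin_comb (l : List Int) : List (Int × Int) :=
  (PySem.List.pyRange 0 (l.length : Int) 1).foldl
    (fun pairs i =>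
      if i + 1 ≥ (l.length : Int) then
        pairs ++ [(PySem.List.pyGetD l 0 0, PySem.List.pyGetD l (-1) 0)]
      else
        pairs ++ [(PySem.List.pyGetD l i 0, PySem.List.pyGetD l (i + 1) 0)]) []

-- ===== PORT B =====
-- one step of B's loop body: if succ is set, append (x, succ); in every case succ := x
def pvStep (st : List (Int × Int) × Option Int) (y : Int) : List (Int × Int) × Option Int :=
  match st.2 with
  | some s => (st.1 ++ [(y, s)], some y)
  | none => (st.1, some y)

-- literal port of B: empty guard; rev = [(l[0], l[-1])]; fold over reversed(l) with carried succ; rev.reverse()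
def lin_comb_alt (l : List Int) : List (Int × Int) :=
  match l with
  | [] => []
  | x :: xs =>
    ((x :: xs).reverse.foldl pvStep
      ([(x, (x :: xs).getLast (by simp))], none)).1.reverse

-- ===== PRECONDITION & SPEC =====
def Spec_lin_comb (l : List Int) (out : List (Int × Int)) : Prop := out = lin_comb_alt l
instance (l : List Int) (out : List (Int × Int)) : Decidable (Spec_lin_comb l out) := by unfold Spec_lin_comb; infer_instance

-- ===== CLAIM (what is proved, stated in full; the proofs are below) =====
def Claim_equal_lin_comb : Prop := ∀ (l : List Int), Dom_lin_comb l → Spec_lin_comb l (lin_comb l)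

-- ===== LEMMAS AND PROOFS =====

-- adjacent pairs (s,y1),(y1,y2),… — proof-side characterisation shared by both ports
def pvAdj : List Int → List (Int × Int)
  | a :: b :: r => (a, b) :: pvAdj (b :: r)
  | _ => []

theorem pvAdj_eq_zip : ∀ (x : Int) (xs : List Int), pvAdj (x :: xs) = (x :: xs).zip xs := by
  intro x xs
  induction xs generalizing x with
  | nil => rfl
  | cons y ys ih => simp [pvAdj, ih y]

theorem pvAdj_append_singleton : ∀ (ys : List Int) (x : Int), ys ≠ [] →
    pvAdj (ys ++ [x]) = pvAdj ys ++ [(ys.getLastD 0, x)] := by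
  intro ys
  induction ys with
  | nil => intro x h; exact absurd rfl h
  | cons a ys ih =>
    intro x _
    cases ys with
    | nil => rfl
    | cons b r =>
      simp only [List.cons_append, pvAdj]
      have h := ih x (by simp)
      simp only [List.cons_append] at h
      rw [h]
      cases r <;> simp

theorem pvAdj_reverse : ∀ (l : List Int), pvAdj l.reverse = ((pvAdj l).map Prod.swap).reverse := by
  intro l
  induction l with
  | nil => rfl
  | cons a l ih =>
    cases l with
    | nil => rfl
    | cons b r =>
      have hne : (b :: r).reverse ≠ [] := by simp
      rw [show (a :: b :: r).reverse = (b :: r).reverse ++ [a] by simp,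
          pvAdj_append_singleton _ _ hne, ih]
      have hlast : (b :: r).reverse.getLastD 0 = b := by
        simp [List.getLastD_eq_getLast?, List.getLast?_reverse]
      rw [hlast]
      simp [pvAdj]

theorem pvStep_fold_inv : ∀ (ys : List Int) (s : Int) (acc : List (Int × Int)),
    ys.foldl pvStep (acc, some s)
      = (acc ++ (pvAdj (s :: ys)).map Prod.swap, some (ys.getLastD s)) := by
  intro ys
  induction ys with
  | nil => intro s acc; simp [pvAdj]
  | cons y ys ih =>
    intro s acc
    simp only [List.foldl_cons, pvStep]
    rw [ih y (acc ++ [(y, s)])]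
    simp [pvAdj]
    cases ys <;> simp [List.getLast?_cons]

theorem lin_comb_alt_cons (x : Int) (xs : List Int) :
    lin_comb_alt (x :: xs) = pvAdj (x :: xs) ++ [(x, (x :: xs).getLast (by simp))] := by
  have hrev : (x :: xs).reverse
      = (x :: xs).getLast (by simp) :: ((x :: xs).dropLast).reverse := by
    conv_lhs => rw [← List.dropLast_append_getLast (l := x :: xs) (by simp)]
    simp
  rw [show lin_comb_alt (x :: xs)
        = ((x :: xs).reverse.foldl pvStep
            ([(x, (x :: xs).getLast (by simp))], none)).1.reverse from rfl, hrev]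
  simp only [List.foldl_cons, pvStep]
  rw [pvStep_fold_inv]
  rw [show ((x :: xs).getLast (by simp) :: ((x :: xs).dropLast).reverse) = (x :: xs).reverse from hrev.symm]
  rw [pvAdj_reverse]
  simp [List.map_reverse, List.map_map]

theorem lin_comb_cons (x : Int) (xs : List Int) :
    lin_comb (x :: xs) = (x :: xs).zip xs ++ [(x, (x :: xs).getLast (by simp))] := by
  have hbody : (fun (pairs : List (Int × Int)) (i : Int) =>
      if i + 1 ≥ ((x :: xs).length : Int) then
        pairs ++ [(PySem.List.pyGetD (x :: xs) 0 0, PySem.List.pyGetD (x :: xs) (-1) 0)]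
      else
        pairs ++ [(PySem.List.pyGetD (x :: xs) i 0, PySem.List.pyGetD (x :: xs) (i + 1) 0)])
    = fun pairs i => pairs ++ [if i + 1 ≥ ((x :: xs).length : Int) then
        (PySem.List.pyGetD (x :: xs) 0 0, PySem.List.pyGetD (x :: xs) (-1) 0)
      else
        (PySem.List.pyGetD (x :: xs) i 0, PySem.List.pyGetD (x :: xs) (i + 1) 0)] := by
    funext p i; split <;> rfl
  rw [lin_comb, hbody, PySem.List.foldl_append_singleton_eq_map,
      PySem.List.pyRange_zero_natCast, List.map_map]
  show (List.range (xs.length + 1)).map _ = _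
  rw [List.range_succ, List.map_append]
  congr 1
  · apply List.ext_getElem
    · simp
    · intro i h1 h2
      have hi : i < xs.length := by simpa using h1
      simp only [Function.comp, List.getElem_map, List.getElem_range]
      rw [if_neg (by simp only [List.length_cons]; push_cast; omega)]
      have h1' : (i : Int) + 1 = ((i + 1 : Nat) : Int) := by push_cast; ring
      rw [h1', PySem.List.pyGetD_natCast, PySem.List.pyGetD_natCast]
      have hi' : i < (x :: xs).length := by simp; omega
      have hi'' : i + 1 < (x :: xs).length := by simp; omega
      simp [List.getElem_zip, List.getElem?_eq_getElem hi', hi]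
  · simp only [Function.comp, List.map_cons, List.map_nil]
    rw [if_pos (by simp only [List.length_cons]; push_cast; omega)]
    rw [PySem.List.pyGetD_zero_cons]
    simp [pysem, List.getLast_eq_getElem]

-- ===== VERDICT (by name: the statement is the Claim_ definition above) =====
theorem lin_comb_spec : Claim_equal_lin_comb := by
  intro l _
  unfold Spec_lin_comb
  cases l with
  | nil => rfl
  | cons x xs => rw [lin_comb_cons, lin_comb_alt_cons, pvAdj_eq_zip]
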